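-- pv_equiv track=rewrite | github.com/Andrewlearning/LcycRepo | lc/BinarySearch/没有明确target,需要返回某个位置(左右区间)/668m. 乘法表中第k小的数(左边界，第k小).py | lessAndEqualk
-- ===== SOURCE A (Python) =====
-- def lessAndEqualk(x, lengthI, lengthJ):
--     count = 0
--     """
--     k=4, <= 4的数有多少呢
--     (1	2	3)
--     (2	4)	6
--     (3)	6	9
--     第一列，min(4//1, 3) = 3, 取min length rows是因为，有可能k//i会超出这一行的个数
--     第二列，min(4//2, 3) = 2
--     ...
--     """
--     for i in range(1, lengthI+1):
--         count += min(x // i, lengthJ)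
--     return count
-- ===== SOURCE B (Python) =====
-- def lessAndEqualk(x, lengthI, lengthJ):
--     # count entries i*j <= x in the lengthI x lengthJ table:
--     # rows i <= x // lengthJ contribute all lengthJ entries (closed form);
--     # the remaining rows contribute x // i each, summed by divisor blocking.
--     m = max(0, min(x // lengthJ, lengthI))
--     return lengthJ * m + _floorsum(x, m + 1, lengthI)
--
-- def _floorsum(x, lo, hi):
--     # sum of x // i for i = lo..hi
--     if lo > hi:
--         return 0
--     if x < 0:
--         # floor(x/i) = -1 - floor((-x-1)/i)
--         return -(hi - lo + 1) - _floorsum(-x - 1, lo, hi)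
--     total = 0
--     i = lo
--     while i <= hi:
--         q = x // i
--         if q == 0:
--             break
--         last = min(hi, x // q)
--         total += q * (last - i + 1)
--         i = last + 1
--     return total
-- ===== Notes on version B (the rewrite author's own statement) =====
-- stated objective: faster
-- what changed: A sums min(x//i, lengthJ) with one loop iteration per row i in 1..lengthI; B takes the saturated rows in closed form (lengthJ * m at the threshold m = x//lengthJ) and sums the remaining floor(x/i) terms by divisor blocking, about sqrt(|x|) blocks instead of lengthI iterations. Pre_ excludes non-positive lengthJ (a table with no or negative columns, outside the function's natural domain): B divides by lengthJ so it raises on 0, and A's value for negative lengthJ is an accident of capping by a negative number.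
-- outside the precondition, e.g. on lessAndEqualk(4, 3, 0): A returns 0, B raises ZeroDivisionError; on lessAndEqualk(4, 3, -1): A returns -3, B returns 7
import Mathlib
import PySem

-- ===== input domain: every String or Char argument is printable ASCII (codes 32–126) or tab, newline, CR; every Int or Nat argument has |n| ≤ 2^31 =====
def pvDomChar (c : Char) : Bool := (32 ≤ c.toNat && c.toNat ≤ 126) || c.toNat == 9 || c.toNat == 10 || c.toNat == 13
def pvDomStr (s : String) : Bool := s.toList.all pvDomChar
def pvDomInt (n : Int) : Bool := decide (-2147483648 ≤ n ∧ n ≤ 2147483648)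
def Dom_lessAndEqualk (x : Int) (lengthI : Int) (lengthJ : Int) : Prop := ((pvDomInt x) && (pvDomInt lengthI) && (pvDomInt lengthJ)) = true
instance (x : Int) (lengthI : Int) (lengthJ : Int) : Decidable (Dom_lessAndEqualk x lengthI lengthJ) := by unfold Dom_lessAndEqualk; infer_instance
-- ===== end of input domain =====

-- B replaces A's O(lengthI) row-by-row loop with a closed form for the saturated rows
-- plus divisor-blocking summation of floor(x/i) (objective: faster, asymptotically).


-- ===== PORT A =====
-- for i in range(1, lengthI+1): count += min(x // i, lengthJ)
def lessAndEqualk (x : Int) (lengthI : Int) (lengthJ : Int) : Int :=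
  (PySem.List.pyRange 1 (lengthI + 1) 1).foldl
    (fun count i => count + min (PySem.Int.floordiv x i) lengthJ) 0

-- ===== PORT B =====
-- _floorsum's while loop, ported with a fuel counter: each Python iteration
-- consumes one unit; hi+1-lo units suffice on B's calls (x ≥ 0, 1 ≤ lo), proved below.
def floorsumGo (y : Int) : Nat → Int → Int → Int
  | 0, _, _ => 0
  | fuel + 1, i, hi =>
    if i > hi then 0
    else
      let q := PySem.Int.floordiv y i
      if q = 0 then 0
      else
        let last := min hi (PySem.Int.floordiv y q)
        q * (last - i + 1) + floorsumGo y fuel (last + 1) hi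

-- _floorsum; the recursive call with -x-1 lands in the loop branch, inlined here
def floorsum (x : Int) (lo : Int) (hi : Int) : Int :=
  if lo > hi then 0
  else if x < 0 then -(hi - lo + 1) - floorsumGo (-x - 1) (hi + 1 - lo).toNat lo hi
  else floorsumGo x (hi + 1 - lo).toNat lo hi

def lessAndEqualk_alt (x : Int) (lengthI : Int) (lengthJ : Int) : Int :=
  let m := max 0 (min (PySem.Int.floordiv x lengthJ) lengthI)
  lengthJ * m + floorsum x (m + 1) lengthI

-- ===== PRECONDITION & SPEC =====
-- Pre_ excludes non-positive lengthJ: a table with no (or negative) columns is outside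
-- the function's natural domain; B's division by lengthJ raises on 0, and A's value for
-- negative lengthJ (each row capped by a negative count) is an accident of min.
def Pre_lessAndEqualk (x : Int) (lengthI : Int) (lengthJ : Int) : Prop := 1 ≤ lengthJ
instance (x : Int) (lengthI : Int) (lengthJ : Int) : Decidable (Pre_lessAndEqualk x lengthI lengthJ) := by unfold Pre_lessAndEqualk; infer_instance
def pvWitness_lessAndEqualk : Int × Int × Int := (4, 3, 2)

def Spec_lessAndEqualk (x : Int) (lengthI : Int) (lengthJ : Int) (out : Int) : Prop := out = lessAndEqualk_alt x lengthI lengthJ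
instance (x : Int) (lengthI : Int) (lengthJ : Int) (out : Int) : Decidable (Spec_lessAndEqualk x lengthI lengthJ out) := by unfold Spec_lessAndEqualk; infer_instance

-- ===== CLAIM (what is proved, stated in full; the proofs are below) =====
def Claim_equal_lessAndEqualk : Prop := ∀ (x : Int) (lengthI : Int) (lengthJ : Int), Dom_lessAndEqualk x lengthI lengthJ → Pre_lessAndEqualk x lengthI lengthJ → Spec_lessAndEqualk x lengthI lengthJ (lessAndEqualk x lengthI lengthJ)

-- ===== LEMMAS AND PROOFS =====

-- sum of f over lo, lo+1, …, lo+k-1 : the common reference both ports are reduced to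
def refsum (f : Int → Int) : Int → Nat → Int
  | _, 0 => 0
  | lo, k + 1 => f lo + refsum f (lo + 1) k

theorem refsum_congr (f g : Int → Int) (lo : Int) (k : Nat)
    (h : ∀ j, lo ≤ j → j < lo + k → f j = g j) :
    refsum f lo k = refsum g lo k := by
  induction k generalizing lo with
  | zero => rfl
  | succ k ih =>
    simp only [refsum]
    rw [h lo le_rfl (by push_cast; omega), ih (lo + 1) (fun j h1 h2 => h j (by omega) (by push_cast at h2 ⊢; omega))]

theorem refsum_const (f : Int → Int) (lo : Int) (k : Nat) (c : Int)
    (h : ∀ j, lo ≤ j → j < lo + k → f j = c) :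
    refsum f lo k = c * k := by
  induction k generalizing lo with
  | zero => simp [refsum]
  | succ k ih =>
    simp only [refsum]
    rw [h lo le_rfl (by push_cast; omega), ih (lo + 1) (fun j h1 h2 => h j (by omega) (by push_cast at h2 ⊢; omega))]
    push_cast; ring

theorem refsum_split (f : Int → Int) (lo : Int) (k1 k2 : Nat) :
    refsum f lo (k1 + k2) = refsum f lo k1 + refsum f (lo + k1) k2 := by
  induction k1 generalizing lo with
  | zero => simp [refsum]
  | succ k1 ih =>
    have : k1 + 1 + k2 = (k1 + k2) + 1 := by omega
    rw [this]
    simp only [refsum, ih (lo + 1)]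
    have : lo + 1 + (k1 : Int) = lo + ((k1 : Nat) + 1 : Nat) := by push_cast; ring
    rw [this]
    ring

theorem refsum_neg (h : Int → Int) (lo : Int) (k : Nat) :
    refsum (fun i => -1 - h i) lo k = -(k : Int) - refsum h lo k := by
  induction k generalizing lo with
  | zero => simp [refsum]
  | succ k ih => simp only [refsum, ih (lo + 1)]; push_cast; ring

-- A's loop is refsum of min(x//i, J) over 1..n
theorem foldA (x J : Int) (a b : Int) (c : Int) :
    (PySem.List.pyRange a b 1).foldl (fun count i => count + min (PySem.Int.floordiv x i) J) c
      = c + refsum (fun i => min (PySem.Int.floordiv x i) J) a (b - a).toNat := by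
  generalize hk : (b - a).toNat = k
  induction k generalizing a c with
  | zero =>
    rw [PySem.List.pyRange_one_eq_nil (by omega)]
    simp [refsum]
  | succ k ih =>
    rw [PySem.List.pyRange_one_cons (by omega)]
    simp only [List.foldl_cons]
    rw [ih (a + 1) _ (by omega), refsum]
    ring

-- floor-division bracket facts (positive divisor)
theorem fdiv_le_fdiv_of_le (y i j : Int) (hy : 0 ≤ y) (hi : 0 < i) (hij : i ≤ j) :
    PySem.Int.floordiv y j ≤ PySem.Int.floordiv y i := by
  have hj : 0 < j := by omega
  have h0 : 0 ≤ PySem.Int.floordiv y j :=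
    (PySem.Int.le_floordiv_iff_mul_le hj).2 (by simpa using hy)
  have h1 : PySem.Int.floordiv y j * j ≤ y :=
    (PySem.Int.le_floordiv_iff_mul_le hj).1 le_rfl
  exact (PySem.Int.le_floordiv_iff_mul_le hi).2
    (le_trans (by nlinarith) h1)

-- the blocking loop computes the interval sum of floor(y/i)
theorem blocking (fuel : Nat) (y lo hi : Int) (hy : 0 ≤ y) (hlo : 1 ≤ lo)
    (hf : (hi + 1 - lo).toNat ≤ fuel) :
    floorsumGo y fuel lo hi = refsum (fun i => PySem.Int.floordiv y i) lo (hi + 1 - lo).toNat := by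
  induction fuel generalizing lo with
  | zero =>
    have hk0 : (hi + 1 - lo).toNat = 0 := by omega
    rw [hk0]; simp [floorsumGo, refsum]
  | succ fuel ih =>
    by_cases hgt : lo > hi
    · have hk0 : (hi + 1 - lo).toNat = 0 := by omega
      rw [hk0]; simp [floorsumGo, hgt, refsum]
    · rw [not_lt] at hgt
      have hlop : 0 < lo := by omega
      have hq0 : 0 ≤ PySem.Int.floordiv y lo :=
        (PySem.Int.le_floordiv_iff_mul_le hlop).2 (by simpa using hy)
      by_cases hq : PySem.Int.floordiv y lo = 0
      · have hz : refsum (fun i => PySem.Int.floordiv y i) lo (hi + 1 - lo).toNat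
            = 0 * ((hi + 1 - lo).toNat : Int) := by
          refine refsum_const _ _ _ 0 (fun j h1 h2 => ?_)
          have h3 : PySem.Int.floordiv y j ≤ PySem.Int.floordiv y lo :=
            fdiv_le_fdiv_of_le y lo j hy hlop h1
          have h4 : 0 ≤ PySem.Int.floordiv y j :=
            (PySem.Int.le_floordiv_iff_mul_le (by omega)).2 (by simpa using hy)
          omega
        rw [hz]
        simp [floorsumGo, hq]
      · have hq1 : 1 ≤ PySem.Int.floordiv y lo := by omega
        have hqp : 0 < PySem.Int.floordiv y lo := by omega
        have hmul : PySem.Int.floordiv y lo * lo ≤ y :=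
          (PySem.Int.le_floordiv_iff_mul_le hlop).1 le_rfl
        have hql : lo ≤ PySem.Int.floordiv y (PySem.Int.floordiv y lo) :=
          (PySem.Int.le_floordiv_iff_mul_le hqp).2 (by nlinarith)
        set q := PySem.Int.floordiv y lo with hqdef
        set last := min hi (PySem.Int.floordiv y q) with hlast
        have hll : lo ≤ last := le_min hgt hql
        have hlh : last ≤ hi := min_le_left _ _
        have step : floorsumGo y (fuel + 1) lo hi
            = q * (last - lo + 1) + floorsumGo y fuel (last + 1) hi := by
          show (if lo > hi then 0 else if q = 0 then 0 else
              q * (last - lo + 1) + floorsumGo y fuel (last + 1) hi) = _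
          rw [if_neg (by omega), if_neg hq]
        rw [step, ih (last + 1) (by omega) (by omega)]
        have hksplit : (hi + 1 - lo).toNat = (last + 1 - lo).toNat + (hi - last).toNat := by omega
        rw [hksplit, refsum_split]
        have hfirst : refsum (fun i => PySem.Int.floordiv y i) lo (last + 1 - lo).toNat
            = q * ((last + 1 - lo).toNat : Int) := by
          refine refsum_const _ _ _ q (fun j h1 h2 => ?_)
          have hjlast : j ≤ last := by omega
          have hjq : j ≤ PySem.Int.floordiv y q := le_trans hjlast (min_le_right _ _)
          have h5 : q ≤ PySem.Int.floordiv y j :=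
            (PySem.Int.le_floordiv_iff_mul_le (by omega)).2
              (by nlinarith [(PySem.Int.le_floordiv_iff_mul_le hqp).1 hjq])
          have h6 : PySem.Int.floordiv y j ≤ q := fdiv_le_fdiv_of_le y lo j hy hlop h1
          omega
        rw [hfirst]
        have hc1 : ((last + 1 - lo).toNat : Int) = last + 1 - lo := by omega
        have hc2 : lo + (last + 1 - lo) = last + 1 := by ring
        have hc3 : (hi + 1 - (last + 1)).toNat = (hi - last).toNat := by omega
        rw [hc1, hc2, hc3]
        ring

-- Python identity: for i > 0 and x < 0, x // i = -1 - ((-x-1) // i)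
theorem fdiv_neg_identity (x i : Int) (hi : 0 < i) :
    PySem.Int.floordiv x i = -1 - PySem.Int.floordiv (-x - 1) i := by
  obtain ⟨h1, h2⟩ := (PySem.Int.floordiv_eq_iff_of_pos hi).1
    (rfl : PySem.Int.floordiv (-x - 1) i = PySem.Int.floordiv (-x - 1) i)
  exact (PySem.Int.floordiv_eq_iff_of_pos hi).2 ⟨by nlinarith, by nlinarith⟩

theorem floorsum_eq (x lo hi : Int) (hlo : 1 ≤ lo) :
    floorsum x lo hi = refsum (fun i => PySem.Int.floordiv x i) lo (hi + 1 - lo).toNat := by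
  unfold floorsum
  split_ifs with h1 h2
  · have hk0 : (hi + 1 - lo).toNat = 0 := by omega
    rw [hk0]; rfl
  · rw [blocking _ (-x - 1) lo hi (by omega) hlo le_rfl]
    rw [refsum_congr (fun i => PySem.Int.floordiv x i)
      (fun i => -1 - PySem.Int.floordiv (-x - 1) i) lo _
      (fun j hj _ => fdiv_neg_identity x j (by omega))]
    rw [refsum_neg]
    have hc : ((hi + 1 - lo).toNat : Int) = hi - lo + 1 := by omega
    rw [hc]
  · exact blocking _ x lo hi (by omega) hlo le_rfl

-- A's port equals the reference sum
theorem A_eq (x n J : Int) :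
    lessAndEqualk x n J = refsum (fun i => min (PySem.Int.floordiv x i) J) 1 n.toNat := by
  unfold lessAndEqualk
  rw [foldA]
  have : (n + 1 - 1).toNat = n.toNat := by omega
  rw [this, zero_add]

-- B's port equals the reference sum (positive lengthJ)
theorem alt_eq (x n J : Int) (hJ : 0 < J) :
    lessAndEqualk_alt x n J = refsum (fun i => min (PySem.Int.floordiv x i) J) 1 n.toNat := by
  unfold lessAndEqualk_alt
  set m0 := PySem.Int.floordiv x J with hm0def
  show J * max 0 (min m0 n) + floorsum x (max 0 (min m0 n) + 1) n = _
  set m := max 0 (min m0 n) with hm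
  by_cases hn : n < 0
  · have hm0 : m = 0 := by omega
    have hnz : n.toNat = 0 := by omega
    rw [hm0, hnz]
    have : floorsum x (0 + 1) n = 0 := by
      unfold floorsum; rw [if_pos (by omega)]
    rw [this]
    simp [refsum]
  · rw [not_lt] at hn
    have hmb : 0 ≤ m ∧ m ≤ n := by omega
    have hcase : (m = 0 ∧ m0 < 0) ∨ (m = n ∧ m0 > n) ∨ m = m0 := by omega
    rw [floorsum_eq x (m + 1) n (by omega)]
    have hsplit : n.toNat = m.toNat + (n + 1 - (m + 1)).toNat := by omega
    rw [hsplit, refsum_split]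
    have hfirst : refsum (fun i => min (PySem.Int.floordiv x i) J) 1 m.toNat
        = J * (m.toNat : Int) := by
      refine refsum_const _ _ _ J (fun j hj1 hj2 => ?_)
      have hjm : j ≤ m := by omega
      have hjm0 : j ≤ m0 := by rcases hcase with ⟨h, h'⟩ | ⟨h, h'⟩ | h <;> omega
      have hmul : j * J ≤ x := (PySem.Int.le_floordiv_iff_mul_le hJ).1 hjm0
      have : J ≤ PySem.Int.floordiv x j :=
        (PySem.Int.le_floordiv_iff_mul_le (show (0:Int) < j by omega)).2 (by nlinarith)
      exact min_eq_right this
    have hsecond : refsum (fun i => min (PySem.Int.floordiv x i) J)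
          (1 + (m.toNat : Int)) (n + 1 - (m + 1)).toNat
        = refsum (fun i => PySem.Int.floordiv x i) (m + 1) (n + 1 - (m + 1)).toNat := by
      have hc : 1 + (m.toNat : Int) = m + 1 := by omega
      rw [hc]
      refine refsum_congr _ _ _ _ (fun j hj1 hj2 => ?_)
      have hjgt : m0 < j := by
        rcases hcase with ⟨h, h'⟩ | ⟨h, h'⟩ | h <;> push_cast at hj2 <;> omega
      have hnot : ¬ (j * J ≤ x) := fun hle =>
        absurd ((PySem.Int.le_floordiv_iff_mul_le hJ).2 hle) (by omega)
      have hxlt : x < j * J := by omega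
      have : PySem.Int.floordiv x j < J + 1 :=
        (PySem.Int.floordiv_lt_iff_lt_mul (show (0:Int) < j by omega)).2 (by nlinarith)
      exact min_eq_left (by omega)
    rw [hfirst, hsecond]
    have : (m.toNat : Int) = m := by omega
    rw [this]

-- ===== VERDICT (by name: the statement is the Claim_ definition above) =====
theorem lessAndEqualk_spec : Claim_equal_lessAndEqualk := by
  intro x lengthI lengthJ _ hpre
  unfold Spec_lessAndEqualk
  rw [A_eq, alt_eq _ _ _ (by exact hpre)]
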